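-- pv_equiv track=rewrite | github.com/nyomanjuniarta/Sampling | src/algo1b.py | findSubsetsAndWeight
-- ===== SOURCE A (Python) =====
-- import itertools
--
-- def findSubsetsAndWeight(S):
--     returnSet = list()
--     maxLen = len(S)
--     for i in range(1,len(S)+1):
--         resultTuple = itertools.combinations(S,i)
--         for t in resultTuple:
--             returnSet.append((set(t),maxLen-len(t)))
--     return returnSet
-- ===== SOURCE B (Python) =====
-- def findSubsetsAndWeight(S):
--     n = len(S)
--
--     def choose(xs, k):
--         # all k-element combinations of xs, in index-lexicographic order
--         if k == 0:
--             return [()]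
--         if not xs:
--             return []
--         first, rest = xs[0], xs[1:]
--         with_first = [(first,) + c for c in choose(rest, k - 1)]
--         return with_first + choose(rest, k)
--
--     return [(set(c), n - len(c)) for i in range(1, n + 1) for c in choose(S, i)]
-- ===== Notes on version B (the rewrite author's own statement) =====
-- stated objective: alternative
-- what changed: Replaces the itertools.combinations call inside an accumulator loop with a hand-rolled structural recursion (prepend-first / skip-first) that enumerates each size's combinations directly, and builds the result as one flat comprehension instead of appending in a nested loop.
import Mathlib
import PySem

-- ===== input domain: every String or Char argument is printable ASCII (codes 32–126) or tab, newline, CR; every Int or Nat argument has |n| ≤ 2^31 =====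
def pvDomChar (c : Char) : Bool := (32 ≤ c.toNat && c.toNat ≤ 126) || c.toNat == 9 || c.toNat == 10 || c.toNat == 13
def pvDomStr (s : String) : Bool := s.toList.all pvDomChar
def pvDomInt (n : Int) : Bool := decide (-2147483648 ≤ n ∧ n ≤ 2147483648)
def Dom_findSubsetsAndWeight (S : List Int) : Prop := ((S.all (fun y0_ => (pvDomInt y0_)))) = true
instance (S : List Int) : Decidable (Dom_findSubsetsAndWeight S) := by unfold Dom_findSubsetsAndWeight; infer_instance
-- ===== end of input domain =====

-- ===== PORT A =====
-- Literal port of A: loop i in range(1, len(S)+1), appending (set(t), maxLen - len(t))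
-- for each t in itertools.combinations(S, i).
def findSubsetsAndWeight (S : List Int) : List (List Int × Int) :=
  let maxLen : Int := S.length
  (PySem.List.pyRange 1 ((S.length : Int) + 1) 1).foldl
    (fun returnSet i =>
      returnSet ++ (PySem.List.combinations S i.toNat).map
        (fun t => (PySem.Set.ofList t, maxLen - (t.length : Int))))
    []

-- ===== PORT B =====
-- B's recursive chooser: k = 0 gives the empty tuple; otherwise combinations
-- containing the first element, then those skipping it.
def chooseAlt : List Int → Nat → List (List Int)
  | _, 0 => [[]]
  | [], _ + 1 => []
  | x :: rest, k + 1 => (chooseAlt rest k).map (x :: ·) ++ chooseAlt rest (k + 1)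

def findSubsetsAndWeight_alt (S : List Int) : List (List Int × Int) :=
  (PySem.List.pyRange 1 ((S.length : Int) + 1) 1).flatMap
    (fun i =>
      (chooseAlt S i.toNat).map
        (fun c => (PySem.Set.ofList c, (S.length : Int) - (c.length : Int))))

-- ===== PRECONDITION & SPEC =====
def Spec_findSubsetsAndWeight (S : List Int) (out : List (List Int × Int)) : Prop := out = findSubsetsAndWeight_alt S
instance (S : List Int) (out : List (List Int × Int)) : Decidable (Spec_findSubsetsAndWeight S out) := by unfold Spec_findSubsetsAndWeight; infer_instance

-- ===== CLAIM (what is proved, stated in full; the proofs are below) =====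
def Claim_equal_findSubsetsAndWeight : Prop := ∀ (S : List Int), Dom_findSubsetsAndWeight S → Spec_findSubsetsAndWeight S (findSubsetsAndWeight S)

-- ===== LEMMAS AND PROOFS =====
theorem chooseAlt_eq_combinations (xs : List Int) : ∀ k, chooseAlt xs k = PySem.List.combinations xs k := by
  induction xs with
  | nil =>
    intro k
    cases k with
    | zero => simp [chooseAlt, PySem.List.combinations_zero]
    | succ k => simp [chooseAlt, PySem.List.combinations_nil_succ]
  | cons x rest ih =>
    intro k
    cases k with
    | zero => simp [chooseAlt, PySem.List.combinations_zero]
    | succ k => simp [chooseAlt, PySem.List.combinations_cons_succ, ih]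

-- ===== VERDICT (by name: the statement is the Claim_ definition above) =====
theorem findSubsetsAndWeight_spec : Claim_equal_findSubsetsAndWeight := by
  intro S _
  unfold Spec_findSubsetsAndWeight findSubsetsAndWeight findSubsetsAndWeight_alt
  rw [PySem.List.foldl_append_eq_flatMap]
  simp [chooseAlt_eq_combinations]
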